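-- pv_equiv track=rewrite | github.com/tliakos/vas | vassal_framework/play.py | _default_instruction
-- ===== SOURCE A (Python) =====
-- def _default_instruction(pending_actions):
--     parts = []
--     routs = [a for a in pending_actions if a.get('type') == 'rout']
--     retreats = [a for a in pending_actions if a.get('type') == 'retreat']
--     if routs:
--         names = ', '.join(a.get('unit', '?') for a in routs)
--         parts.append(f"Rout these units: {names}")
--     if retreats:
--         names = ', '.join(a.get('unit', '?') for a in retreats)
--         parts.append(f"Retreat these units: {names}")
--     parts.append("Move them in VASSAL, then save.")
--     return ' '.join(parts)
-- ===== SOURCE B (Python) =====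
-- def _default_instruction(pending_actions):
--     groups = {}
--     for a in pending_actions:
--         groups.setdefault(a.get('type'), []).append(a.get('unit', '?'))
--     parts = []
--     for t, label in (('rout', 'Rout these units'), ('retreat', 'Retreat these units')):
--         names = groups.get(t, [])
--         if names:
--             parts.append(f"{label}: {', '.join(names)}")
--     parts.append("Move them in VASSAL, then save.")
--     return ' '.join(parts)
-- ===== Notes on version B (the rewrite author's own statement) =====
-- stated objective: alternative
-- what changed: Replaces A's two independent filter passes plus hardcoded if-blocks with a single grouping pass building a type->names dict, then a table-driven assembly over an ordered (type,label) schema.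
import Mathlib
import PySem

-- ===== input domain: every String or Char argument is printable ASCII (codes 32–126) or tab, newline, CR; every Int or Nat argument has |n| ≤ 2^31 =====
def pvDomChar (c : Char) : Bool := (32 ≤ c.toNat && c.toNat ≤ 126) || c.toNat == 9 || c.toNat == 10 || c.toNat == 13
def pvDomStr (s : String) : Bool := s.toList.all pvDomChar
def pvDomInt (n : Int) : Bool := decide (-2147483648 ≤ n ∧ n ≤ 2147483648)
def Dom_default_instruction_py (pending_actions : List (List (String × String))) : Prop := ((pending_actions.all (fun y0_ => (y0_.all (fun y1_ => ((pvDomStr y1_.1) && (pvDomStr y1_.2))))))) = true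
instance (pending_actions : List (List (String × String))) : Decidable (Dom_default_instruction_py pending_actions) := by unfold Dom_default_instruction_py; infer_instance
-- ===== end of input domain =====

-- B replaces A's two filter passes and hardcoded if-blocks with one grouping pass into a
-- type->names dict plus a table-driven assembly (objective: alternative, same cost).


-- ===== PORT A =====
-- a.get('type') / a.get('unit', '?') on a Python dict, exact via PySem.Dict
def pvGetType (a : List (String × String)) : Option String := (PySem.Dict.mk a).get? "type"
def pvGetUnit (a : List (String × String)) : String := (PySem.Dict.mk a).getD "unit" "?"

def default_instruction_py (pending_actions : List (List (String × String))) : String :=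
  let parts : List String := []
  let routs := pending_actions.filter (fun a => pvGetType a == some "rout")
  let retreats := pending_actions.filter (fun a => pvGetType a == some "retreat")
  let parts := if routs.isEmpty then parts else
    parts ++ ["Rout these units: " ++ PySem.Str.join ", " (routs.map pvGetUnit)]
  let parts := if retreats.isEmpty then parts else
    parts ++ ["Retreat these units: " ++ PySem.Str.join ", " (retreats.map pvGetUnit)]
  let parts := parts ++ ["Move them in VASSAL, then save."]
  PySem.Str.join " " parts

-- ===== PORT B =====
-- one grouping pass (dict type -> list of unit names), then a table-driven assembly
def default_instruction_py_alt (pending_actions : List (List (String × String))) : String :=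
  let groups := pending_actions.foldl
    (fun d a => d.modify (pvGetType a) [] (fun l => l ++ [pvGetUnit a])) PySem.Dict.empty
  let parts := [("rout", "Rout these units"), ("retreat", "Retreat these units")].foldl
    (fun parts tl =>
      let names := groups.getD (some tl.1) []
      if names.isEmpty then parts
      else parts ++ [tl.2 ++ ": " ++ PySem.Str.join ", " names]) ([] : List String)
  let parts := parts ++ ["Move them in VASSAL, then save."]
  PySem.Str.join " " parts

-- ===== PRECONDITION & SPEC =====
def Spec_default_instruction_py (pending_actions : List (List (String × String))) (out : String) : Prop := out = default_instruction_py_alt pending_actions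
instance (pending_actions : List (List (String × String))) (out : String) : Decidable (Spec_default_instruction_py pending_actions out) := by unfold Spec_default_instruction_py; infer_instance

-- ===== CLAIM (what is proved, stated in full; the proofs are below) =====
def Claim_equal_default_instruction_py : Prop := ∀ (pending_actions : List (List (String × String))), Dom_default_instruction_py pending_actions → Spec_default_instruction_py pending_actions (default_instruction_py pending_actions)

-- ===== LEMMAS AND PROOFS =====

lemma groups_getD (pending_actions : List (List (String × String))) (t : String) :
    (pending_actions.foldl
      (fun d a => d.modify (pvGetType a) [] (fun l => l ++ [pvGetUnit a]))
      PySem.Dict.empty).getD (some t) []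
      = (pending_actions.filter (fun a => pvGetType a == some t)).map pvGetUnit := by
  have h := List.foldl_map (f := fun a : List (String × String) => (pvGetType a, pvGetUnit a))
    (g := fun (d : PySem.Dict (Option String) (List String)) (p : Option String × String) =>
      d.modify p.1 [] (fun l => l ++ [p.2]))
    (l := pending_actions) (init := PySem.Dict.empty)
  rw [← h, PySem.Dict.getD_foldl_modify_append, PySem.Dict.getD_empty]
  rw [List.filter_map, List.map_map]
  rfl
-- ===== VERDICT (by name: the statement is the Claim_ definition above) =====
theorem default_instruction_py_spec : Claim_equal_default_instruction_py := by
  intro pending_actions _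
  unfold Spec_default_instruction_py default_instruction_py default_instruction_py_alt
  simp only [List.foldl_cons, List.foldl_nil, groups_getD, List.isEmpty_map, List.nil_append,
    show ("Rout these units" ++ ": " : String) = "Rout these units: " from rfl,
    show ("Retreat these units" ++ ": " : String) = "Retreat these units: " from rfl]
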